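-- pv_equiv track=rewrite | github.com/Nimdy/NjordScan | njordscan/modules/code_static.py | _is_directory_listing
-- ===== SOURCE A (Python) =====
-- def _is_directory_listing(content: str) -> bool:
--     """Check if content appears to be a directory listing."""
--     # Common directory listing indicators
--     listing_indicators = [
--         'Index of',
--         'Directory listing',
--         'Parent Directory',
--         '<a href="../">',
--         'Last modified',
--         'Size</th>',
--         'Name</th>',
--         'Apache/',
--         'nginx/',
--         'Microsoft-IIS/'
--     ]
--
--     return any(indicator in content for indicator in listing_indicators)
-- ===== SOURCE B (Python) =====
-- # The indicators, grouped up front by first character: key = first char, value = the tails.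
-- _LISTING_BY_FIRST = {
--     'I': ['ndex of'],
--     'D': ['irectory listing'],
--     'P': ['arent Directory'],
--     '<': ['a href="../">'],
--     'L': ['ast modified'],
--     'S': ['ize</th>'],
--     'N': ['ame</th>'],
--     'A': ['pache/'],
--     'n': ['ginx/'],
--     'M': ['icrosoft-IIS/'],
-- }
--
--
-- def _is_directory_listing(content: str) -> bool:
--     """Check if content appears to be a directory listing."""
--     # Single left-to-right scan: at each position test only the indicators
--     # dispatched by the current character.
--     for i, ch in enumerate(content):
--         for rest in _LISTING_BY_FIRST.get(ch, []):
--             if content.startswith(rest, i + 1):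
--                 return True
--     return False
-- ===== Notes on version B (the rewrite author's own statement) =====
-- stated objective: alternative
-- what changed: Instead of running a separate substring search over the content for each of the 10 indicators, B groups the indicator tails in a dict keyed by first character and makes a single left-to-right scan of the content, testing only the indicators dispatched by the current character.
import Mathlib
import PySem

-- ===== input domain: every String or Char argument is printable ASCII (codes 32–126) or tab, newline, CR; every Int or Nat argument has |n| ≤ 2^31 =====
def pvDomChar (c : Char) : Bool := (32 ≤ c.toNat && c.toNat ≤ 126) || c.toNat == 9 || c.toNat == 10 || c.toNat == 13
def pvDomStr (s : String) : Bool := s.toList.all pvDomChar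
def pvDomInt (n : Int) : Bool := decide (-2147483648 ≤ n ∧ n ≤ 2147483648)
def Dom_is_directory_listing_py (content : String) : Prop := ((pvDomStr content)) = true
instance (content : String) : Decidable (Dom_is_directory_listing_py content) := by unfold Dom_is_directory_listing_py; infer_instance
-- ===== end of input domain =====

-- B groups the indicator tails by first character and makes a single left-to-right scan of the
-- content instead of one substring search per indicator (alternative decomposition, same result).


-- ===== PORT A =====
def listingIndicators : List String :=
  ["Index of", "Directory listing", "Parent Directory", "<a href=\"../\">",
   "Last modified", "Size</th>", "Name</th>", "Apache/", "nginx/", "Microsoft-IIS/"]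

def is_directory_listing_py (content : String) : Bool :=
  listingIndicators.any (fun indicator => PySem.Str.isIn indicator content)

-- ===== PORT B =====
-- _LISTING_BY_FIRST: the module-level dispatch dict literal (first char -> list of tails)
def byFirst : PySem.Dict Char (List (List Char)) :=
  PySem.Dict.ofList
    [('I', ["ndex of".toList]), ('D', ["irectory listing".toList]),
     ('P', ["arent Directory".toList]), ('<', ["a href=\"../\">".toList]),
     ('L', ["ast modified".toList]), ('S', ["ize</th>".toList]),
     ('N', ["ame</th>".toList]), ('A', ["pache/".toList]),
     ('n', ["ginx/".toList]), ('M', ["icrosoft-IIS/".toList])]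

-- the single scan: at each position, test only the tails dispatched by the current character
-- (content.startswith(rest, i + 1) is 'rest' being a prefix of the remaining tail)
def scanFrom (d : PySem.Dict Char (List (List Char))) : List Char → Bool
  | [] => false
  | c :: tl => (d.getD c []).any (fun rest => rest.isPrefixOf tl) || scanFrom d tl

def is_directory_listing_py_alt (content : String) : Bool :=
  scanFrom byFirst content.toList

-- ===== PRECONDITION & SPEC =====
def Spec_is_directory_listing_py (content : String) (out : Bool) : Prop := out = is_directory_listing_py_alt content
instance (content : String) (out : Bool) : Decidable (Spec_is_directory_listing_py content out) := by unfold Spec_is_directory_listing_py; infer_instance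

-- ===== CLAIM (what is proved, stated in full; the proofs are below) =====
def Claim_equal_is_directory_listing_py : Prop := ∀ (content : String), Dom_is_directory_listing_py content → Spec_is_directory_listing_py content (is_directory_listing_py content)

-- ===== LEMMAS AND PROOFS =====

-- proof-side view: the original indicator list as code-point lists
def listingIndicatorsB : List (List Char) :=
  ["Index of".toList, "Directory listing".toList, "Parent Directory".toList,
   "<a href=\"../\">".toList, "Last modified".toList, "Size</th>".toList,
   "Name</th>".toList, "Apache/".toList, "nginx/".toList, "Microsoft-IIS/".toList]

-- what the grouping dict contains: exactly the indicators, split head/tail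
lemma mem_byFirst (c : Char) (rest : List Char) :
    rest ∈ byFirst.getD c [] ↔ (c :: rest) ∈ listingIndicatorsB := by
  simp only [byFirst, PySem.Dict.ofList, PySem.Dict.getD_eq_get?_getD]
  simp only [PySem.Dict.update, List.foldl, PySem.Dict.get?_insert,
    PySem.Dict.get?_empty, listingIndicatorsB]
  split_ifs <;> simp_all

-- the scan finds a hit iff some indicator is an infix of the content
lemma scanFrom_iff (cs : List Char) :
    scanFrom byFirst cs = true ↔ ∃ ind ∈ listingIndicatorsB, ind <:+: cs := by
  induction cs with
  | nil =>
    simp only [scanFrom, Bool.false_eq_true, false_iff]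
    rintro ⟨ind, hmem, hinf⟩
    rw [List.infix_nil] at hinf
    subst hinf
    revert hmem; decide
  | cons c tl ih =>
    simp only [scanFrom, Bool.or_eq_true, List.any_eq_true, ih]
    constructor
    · rintro (⟨rest, hmem, hpre⟩ | ⟨ind, hmem, hinf⟩)
      · exact ⟨c :: rest, (mem_byFirst c rest).1 hmem,
          (List.cons_prefix_cons.mpr ⟨rfl, List.isPrefixOf_iff_prefix.mp hpre⟩).isInfix⟩
      · exact ⟨ind, hmem, hinf.trans (List.suffix_cons c tl).isInfix⟩
    · rintro ⟨ind, hmem, hinf⟩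
      rcases List.infix_cons_iff.mp hinf with hpre | hinf'
      · cases ind with
        | nil => exact absurd hmem (by decide)
        | cons c' rest =>
          obtain ⟨hc, hrest⟩ := List.cons_prefix_cons.mp hpre
          subst hc
          exact Or.inl ⟨rest, (mem_byFirst _ rest).2 hmem,
            List.isPrefixOf_iff_prefix.mpr hrest⟩
      · exact Or.inr ⟨ind, hmem, hinf'⟩

lemma map_toList_indicators : listingIndicators.map String.toList = listingIndicatorsB := by
  decide

-- A finds a hit iff some indicator is an infix of the content
lemma A_iff (content : String) :
    is_directory_listing_py content = true ↔
      ∃ ind ∈ listingIndicatorsB, ind <:+: content.toList := by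
  simp only [is_directory_listing_py, List.any_eq_true, ← map_toList_indicators,
    List.mem_map, PySem.Str.isIn_iff_infix]
  constructor
  · rintro ⟨s, hs, hin⟩
    exact ⟨s.toList, ⟨s, hs, rfl⟩, hin⟩
  · rintro ⟨ind, ⟨s, hs, rfl⟩, hinf⟩
    exact ⟨s, hs, hinf⟩

-- ===== VERDICT (by name: the statement is the Claim_ definition above) =====
theorem is_directory_listing_py_spec : Claim_equal_is_directory_listing_py := by
  intro content _
  unfold Spec_is_directory_listing_py
  exact Bool.eq_iff_iff.mpr ((A_iff content).trans (scanFrom_iff content.toList).symm)
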